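-- pv_equiv track=rewrite | github.com/preetpal725/Yelp_data | balanced_yelp_project.py | balance_classes
-- ===== SOURCE A (Python) =====
-- from collections import Counter
--
-- def balance_classes(xs, ys):
--     ''' Undersample xs, ys to balance classes '''
--     freqs = Counter(ys)
--     ''' The least common rating is the maximum number we want for all the other ratings '''
--     max_allowable = freqs.most_common()[-1][1]
--     num_added = {clss: 0 for clss in freqs.keys()}
--     new_ys = []
--     new_xs = []
--     for i, y in enumerate(ys):
--         if num_added[y] < max_allowable:
--             new_ys.append(y)
--             new_xs.append(xs[i])
--             num_added[y] += 1
--     return new_xs, new_ys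
-- ===== SOURCE B (Python) =====
-- def balance_classes(xs, ys):
--     ''' Undersample xs, ys to balance classes '''
--     groups = {}
--     for i, y in enumerate(ys):
--         groups.setdefault(y, []).append(i)
--     m = min(len(g) for g in groups.values())
--     selected = set()
--     for g in groups.values():
--         selected.update(g[:m])
--     new_xs = [xs[i] for i in range(len(ys)) if i in selected]
--     new_ys = [ys[i] for i in range(len(ys)) if i in selected]
--     return new_xs, new_ys
-- ===== Notes on version B (the rewrite author's own statement) =====
-- stated objective: alternative
-- what changed: Replaces A's running per-class quota dictionary checked inside the output loop by a group-then-select decomposition: one pass groups indices by class, the minimum group size is taken, the first m indices of each group go into a selected set, and a second pass over the index range emits xs[i]/ys[i] for selected i.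
-- outside the precondition, e.g. on balance_classes([10, 20], [5, 6, 5]): A returns ([10, 20], [5, 6]), B returns ([10, 20], [5, 6])
import Mathlib
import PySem

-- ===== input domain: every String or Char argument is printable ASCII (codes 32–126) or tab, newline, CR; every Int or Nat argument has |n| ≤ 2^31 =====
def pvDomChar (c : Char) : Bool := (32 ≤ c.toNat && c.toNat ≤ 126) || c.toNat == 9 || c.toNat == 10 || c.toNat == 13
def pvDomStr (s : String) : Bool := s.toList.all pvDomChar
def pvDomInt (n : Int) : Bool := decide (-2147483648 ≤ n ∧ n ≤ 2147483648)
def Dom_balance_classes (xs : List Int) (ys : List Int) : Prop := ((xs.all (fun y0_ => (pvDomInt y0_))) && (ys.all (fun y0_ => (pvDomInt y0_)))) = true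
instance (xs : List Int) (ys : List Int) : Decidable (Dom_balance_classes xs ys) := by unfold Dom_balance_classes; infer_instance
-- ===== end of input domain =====

-- B replaces A's running per-class quota dict checked inside the output loop by a different
-- decomposition: group indices by class, take the first m of each group into a selected set,
-- then emit the selected positions in a second pass (same cost; equivalence of return values).

-- ===== PORT A =====
def balance_classes (xs : List Int) (ys : List Int) : List Int × List Int :=
  let freqs := PySem.Dict.counter ys
  -- freqs.most_common()[-1][1]; [-1] on the empty list is Python's IndexError, excluded by Pre_
  let max_allowable := (PySem.List.pyGetD (PySem.List.sorted freqs.items (fun kv => kv.2) true) (-1) (0, 0)).2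
  let num_added : PySem.Dict Int Int := freqs.keys.foldl (fun d clss => d.insert clss 0) PySem.Dict.empty
  let res := (PySem.List.enumerate ys).foldl
    (fun (acc : PySem.Dict Int Int × List Int × List Int) p =>
      if acc.1.getD p.2 0 < max_allowable then
        (acc.1.insert p.2 (acc.1.getD p.2 0 + 1), acc.2.1 ++ [p.2],
         acc.2.2 ++ [PySem.List.pyGetD xs p.1 0])    -- xs[i]; in range under Pre_
      else acc)
    (num_added, [], [])
  (res.2.2, res.2.1)

-- ===== PORT B =====
def balance_classes_alt (xs : List Int) (ys : List Int) : List Int × List Int :=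
  let groups : PySem.Dict Int (List Int) :=
    (PySem.List.enumerate ys).foldl (fun d p => d.modify p.2 [] (· ++ [p.1])) PySem.Dict.empty
  -- min(...) of an empty generator is Python's ValueError, excluded by Pre_
  let m : Int := (PySem.List.min? (groups.values.map (fun g => PySem.List.len g)) (fun x => x)).getD 0
  let selected : PySem.Set Int :=
    groups.values.foldl (fun s g => PySem.Set.update s (PySem.List.slice g none (some m))) PySem.Set.empty
  let new_xs := (PySem.List.pyRange 0 (PySem.List.len ys) 1).filterMap
    (fun i => if PySem.Set.contains selected i then some (PySem.List.pyGetD xs i 0) else none)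
  let new_ys := (PySem.List.pyRange 0 (PySem.List.len ys) 1).filterMap
    (fun i => if PySem.Set.contains selected i then some (PySem.List.pyGetD ys i 0) else none)
  (new_xs, new_ys)

-- ===== PRECONDITION & SPEC =====
-- Pre_ excludes ys = [] (A raises IndexError on most_common()[-1]) and, as a clean superset of
-- the remaining IndexError cases, inputs with len(ys) > len(xs): when xs is shorter than ys, A
-- raises IndexError on xs[i] unless every selected index happens to fall inside xs — those
-- accidental returning inputs are excluded too (see the cite in claim.json).
def Pre_balance_classes (xs : List Int) (ys : List Int) : Prop :=
  ys ≠ [] ∧ ys.length ≤ xs.length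
instance (xs : List Int) (ys : List Int) : Decidable (Pre_balance_classes xs ys) := by
  unfold Pre_balance_classes; infer_instance
def pvWitness_balance_classes : List Int × List Int := ([10, 20, 30], [1, 2, 1])

def Spec_balance_classes (xs : List Int) (ys : List Int) (out : List Int × List Int) : Prop := out = balance_classes_alt xs ys
instance (xs : List Int) (ys : List Int) (out : List Int × List Int) : Decidable (Spec_balance_classes xs ys out) := by unfold Spec_balance_classes; infer_instance

-- ===== CLAIM (what is proved, stated in full; the proofs are below) =====
def Claim_equal_balance_classes : Prop := ∀ (xs : List Int) (ys : List Int), Dom_balance_classes xs ys → Pre_balance_classes xs ys → Spec_balance_classes xs ys (balance_classes xs ys)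

-- ===== LEMMAS AND PROOFS =====

-- the selection rule both programs implement: position k is kept iff fewer than m earlier
-- positions carry the same class value
def pvPred (ys : List Int) (m : Int) (k : Nat) : Bool :=
  decide ((((ys.take k).count (ys.getD k 0) : Int)) < m)

def pvSel (ys : List Int) (m : Int) : List Nat :=
  (List.range ys.length).filter (pvPred ys m)

-- ---- generic small lemmas ----

theorem pv_filterMap_if (l : List Nat) (p : Nat → Bool) (f : Nat → Int) :
    l.filterMap (fun k => if p k then some (f k) else none) = (l.filter p).map f := by
  induction l with
  | nil => rfl
  | cons a t ih => by_cases h : p a <;> simp [h, ih]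

theorem pv_mem_take_filter_range (n t k : Nat) (p : Nat → Bool) (hk : k < n) :
    k ∈ ((List.range n).filter p).take t ↔
      p k = true ∧ ((List.range k).filter p).length < t := by
  induction n with
  | zero => omega
  | succ n ih =>
    rw [List.range_succ, List.filter_append, List.take_append, List.mem_append]
    by_cases hkn : k < n
    · have h2 : ¬ k ∈ (List.filter p [n]).take (t - ((List.range n).filter p).length) := by
        intro h
        have := (List.mem_filter.1 (List.mem_of_mem_take h)).1
        simp at this; omega
      simp only [ih hkn]; tauto
    · have hk' : k = n := by omega
      have h1 : ¬ k ∈ ((List.range n).filter p).take t := by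
        intro h
        have := List.mem_range.1 (List.mem_filter.1 (List.mem_of_mem_take h)).1
        omega
      have hrk : List.range k = List.range n := by rw [hk']
      by_cases hp : p k
      · have hf : List.filter p [n] = [n] := by simp [List.filter, hk' ▸ hp]
        rw [hf, hrk]
        have hmem : k ∈ List.take (t - ((List.range n).filter p).length) [n] ↔
            ((List.range n).filter p).length < t := by
          cases h : t - ((List.range n).filter p).length with
          | zero => simp; omega
          | succ s => simp [List.take, hk']; omega
        simp only [hmem]
        simp [hp, h1]
      · have hf : List.filter p [n] = [] := by simp [List.filter, hk' ▸ hp]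
        rw [hf, hrk]
        simp [hp, h1]

theorem pv_take_eq_map_range (ys : List Int) (k : Nat) (hk : k ≤ ys.length) :
    ys.take k = (List.range k).map (fun j => ys.getD j 0) := by
  apply List.ext_getElem
  · simp; omega
  · intro i h1 h2
    simp at h1 ⊢
    rw [List.getElem?_eq_getElem (by omega : i < ys.length)]
    rfl

theorem pv_count_take (ys : List Int) (k : Nat) (c : Int) (hk : k ≤ ys.length) :
    (ys.take k).count c = ((List.range k).filter (fun j => ys.getD j 0 == c)).length := by
  rw [pv_take_eq_map_range ys k hk, List.count_eq_countP, List.countP_map,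
    List.countP_eq_length_filter]
  rfl

theorem pv_getLast_key_min {α : Type} (l : List (α × Int)) (h : l ≠ [])
    (hp : l.Pairwise (fun a b => b.2 ≤ a.2)) :
    ∀ q ∈ l, (l.getLast h).2 ≤ q.2 := by
  intro q hq
  have h2 := List.dropLast_append_getLast h
  rw [← h2, List.pairwise_append] at hp
  rw [← h2, List.mem_append] at hq
  rcases hq with h3 | h3
  · exact hp.2.2 q h3 _ (by simp)
  · simp at h3; rw [h3]

theorem pv_mem_foldl_update (gs : List (List Int)) (s : PySem.Set Int) (m : Int) (y : Int) :
    y ∈ gs.foldl (fun s g => PySem.Set.update s (PySem.List.slice g none (some m))) s ↔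
      y ∈ s ∨ ∃ g ∈ gs, y ∈ PySem.List.slice g none (some m) := by
  induction gs generalizing s with
  | nil => simp
  | cons g t ih => simp [List.foldl_cons, ih, PySem.Set.mem_update]; tauto

theorem pv_init_dict_getD (l : List Int) (d : PySem.Dict Int Int)
    (hd : ∀ c, d.getD c 0 = 0) (c : Int) :
    (l.foldl (fun d clss => d.insert clss 0) d).getD c 0 = 0 := by
  induction l generalizing d with
  | nil => exact hd c
  | cons a t ih =>
      refine ih _ (fun c' => ?_)
      rw [PySem.Dict.getD_insert]
      split <;> simp [hd]

-- ---- B-side characterisation ----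

theorem pv_groups_getD (ys : List Int) (c : Int) :
    ((PySem.List.enumerate ys).foldl (fun d p => d.modify p.2 [] (· ++ [p.1])) (PySem.Dict.empty : PySem.Dict Int (List Int))).getD c []
    = ((List.range ys.length).filter (fun j => ys.getD j 0 == c)).map (fun (j : Nat) => (j : Int)) := by
  have h1 : ((PySem.List.enumerate ys).foldl (fun d p => d.modify p.2 [] (· ++ [p.1])) (PySem.Dict.empty : PySem.Dict Int (List Int)))
      = (((PySem.List.enumerate ys).map Prod.swap).foldl (fun d p => d.modify p.1 [] (· ++ [p.2])) PySem.Dict.empty) := by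
    rw [List.foldl_map]; rfl
  rw [h1, PySem.Dict.getD_foldl_modify_append, PySem.List.enumerate_eq_map_pyRange ys 0,
      PySem.List.len_eq, PySem.List.pyRange_zero_nat]
  simp [List.filter_map, Function.comp_def, List.map_map, PySem.List.pyGetD_natCast]

theorem pv_groups_keys (ys : List Int) :
    ((PySem.List.enumerate ys).foldl (fun d p => d.modify p.2 [] (· ++ [p.1])) (PySem.Dict.empty : PySem.Dict Int (List Int))).keys
    = PySem.Set.ofList ys := by
  have h := PySem.Dict.keys_foldl_modify_key (PySem.List.enumerate ys) (fun p => p.2) []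
    (fun _ p => (· ++ [p.1])) (PySem.Dict.empty : PySem.Dict Int (List Int))
  simpa [PySem.Set.update_nil_left, PySem.List.map_snd_enumerate] using h

theorem pv_groups_nodup_keys (ys : List Int) :
    ((PySem.List.enumerate ys).foldl (fun d p => d.modify p.2 [] (· ++ [p.1])) (PySem.Dict.empty : PySem.Dict Int (List Int))).keys.Nodup := by
  rw [pv_groups_keys]; exact PySem.Set.nodup_ofList ys

theorem pv_groups_values (ys : List Int) :
    ((PySem.List.enumerate ys).foldl (fun d p => d.modify p.2 [] (· ++ [p.1])) (PySem.Dict.empty : PySem.Dict Int (List Int))).values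
    = (PySem.Set.ofList ys).map
        (fun c => ((List.range ys.length).filter (fun j => ys.getD j 0 == c)).map (fun (j : Nat) => (j : Int))) := by
  rw [PySem.Dict.values_eq_map_keys _ (pv_groups_nodup_keys ys) [], pv_groups_keys]
  exact List.map_congr_left (fun c _ => pv_groups_getD ys c)

theorem pv_lens_eq (ys : List Int) :
    ((PySem.List.enumerate ys).foldl (fun d p => d.modify p.2 [] (· ++ [p.1])) (PySem.Dict.empty : PySem.Dict Int (List Int))).values.map (fun g => PySem.List.len g)
    = (PySem.Set.ofList ys).map (fun c => (ys.count c : Int)) := by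
  rw [pv_groups_values, List.map_map]
  refine List.map_congr_left (fun c _ => ?_)
  have h := pv_count_take ys ys.length c (le_refl _)
  rw [List.take_length] at h
  simp only [Function.comp_def, PySem.List.len_eq, List.length_map, h]

-- ---- A-side loop characterisation ----

theorem pv_loopA (xs full : List Int) (m : Int) (rest : List Int) :
    ∀ (pre : List Int) (d : PySem.Dict Int Int) (ay ax : List Int),
    full = pre ++ rest →
    (∀ c, d.getD c 0 = min ((pre.count c : Int)) m) →
    ((PySem.List.enumerate rest (pre.length : Int)).foldl
       (fun (acc : PySem.Dict Int Int × List Int × List Int) p =>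
         if acc.1.getD p.2 0 < m then
           (acc.1.insert p.2 (acc.1.getD p.2 0 + 1), acc.2.1 ++ [p.2],
            acc.2.2 ++ [PySem.List.pyGetD xs p.1 0])
         else acc) (d, ay, ax)).2 =
      (ay ++ ((List.range' pre.length rest.length).filter (pvPred full m)).map (fun k => full.getD k 0),
       ax ++ ((List.range' pre.length rest.length).filter (pvPred full m)).map (fun (k : Nat) => PySem.List.pyGetD xs (k : Int) 0)) := by
  induction rest with
  | nil =>
    intro pre d ay ax hfull hd
    simp [PySem.List.enumerate_nil]
  | cons y t ih =>
    intro pre d ay ax hfull hd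
    rw [PySem.List.enumerate_cons, List.foldl_cons]
    dsimp only
    have hget : full.getD pre.length 0 = y := by
      subst hfull
      simp [List.getD]
    have htake : full.take pre.length = pre := by
      subst hfull; simp
    have hpred : pvPred full m pre.length = decide ((pre.count y : Int) < m) := by
      unfold pvPred; rw [hget, htake]
    have hcnt := hd y
    have hfull' : full = (pre ++ [y]) ++ t := by rw [hfull]; simp
    have hrange : List.range' pre.length (y :: t).length =
        pre.length :: List.range' (pre.length + 1) t.length := List.range'_succ ..
    by_cases hc : (pre.count y : Int) < m
    · have hlt : d.getD y 0 < m := by rw [hcnt]; omega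
      rw [if_pos hlt]
      have hinv : ∀ c, (d.insert y (d.getD y 0 + 1)).getD c 0 = min (((pre ++ [y]).count c : Int)) m := by
        intro c
        rw [PySem.Dict.getD_insert, List.count_append]
        rcases eq_or_ne c y with rfl | hne
        · simp [hcnt]; omega
        · simp [hne, hd c, Ne.symm hne]
      have hstep := ih (pre ++ [y]) (d.insert y (d.getD y 0 + 1)) (ay ++ [y])
        (ax ++ [PySem.List.pyGetD xs (pre.length : Int) 0]) hfull' hinv
      have hlen' : (((pre ++ [y]).length : Nat) : Int) = (pre.length : Int) + 1 := by
        simp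
      rw [hlen'] at hstep
      rw [hstep, hrange, List.filter_cons]
      simp only [hpred, decide_eq_true_eq, hc, if_pos, List.map_cons, hget,
        List.length_append, List.length_singleton]
      simp
    · have hlt : ¬ d.getD y 0 < m := by rw [hcnt]; omega
      rw [if_neg hlt]
      have hinv : ∀ c, d.getD c 0 = min (((pre ++ [y]).count c : Int)) m := by
        intro c
        rw [List.count_append]
        rcases eq_or_ne c y with rfl | hne
        · simp [hcnt]
          rw [hcnt] at hlt
          omega
        · simp [hd c, Ne.symm hne]
      have hstep := ih (pre ++ [y]) d ay ax hfull' hinv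
      have hlen' : (((pre ++ [y]).length : Nat) : Int) = (pre.length : Int) + 1 := by
        simp
      rw [hlen'] at hstep
      rw [hstep, hrange, List.filter_cons]
      simp only [hpred, decide_eq_true_eq, hc, List.length_append, List.length_singleton]
      simp

-- the selected-set membership both programs agree on
theorem pv_selected_mem (ys : List Int) (m : Int) (hm : 0 ≤ m) (k : Nat) (hk : k < ys.length) :
    PySem.Set.contains
      ((((PySem.List.enumerate ys).foldl (fun d p => d.modify p.2 [] (· ++ [p.1])) (PySem.Dict.empty : PySem.Dict Int (List Int))).values).foldl
        (fun s g => PySem.Set.update s (PySem.List.slice g none (some m))) PySem.Set.empty) (k : Int)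
    = pvPred ys m k := by
  rw [Bool.eq_iff_iff]
  have h1 : PySem.Set.contains
      ((((PySem.List.enumerate ys).foldl (fun d p => d.modify p.2 [] (· ++ [p.1])) (PySem.Dict.empty : PySem.Dict Int (List Int))).values).foldl
        (fun s g => PySem.Set.update s (PySem.List.slice g none (some m))) PySem.Set.empty) (k : Int) = true ↔
      (k : Int) ∈ (((PySem.List.enumerate ys).foldl (fun d p => d.modify p.2 [] (· ++ [p.1])) (PySem.Dict.empty : PySem.Dict Int (List Int))).values).foldl
        (fun s g => PySem.Set.update s (PySem.List.slice g none (some m))) PySem.Set.empty := by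
    simp [PySem.Set.contains]
  rw [h1, pv_mem_foldl_update, pv_groups_values]
  have h2 : ∀ c : Int,
      ((k : Int) ∈ PySem.List.slice (((List.range ys.length).filter (fun j => ys.getD j 0 == c)).map (fun (j : Nat) => (j : Int))) none (some m)) ↔
      (ys.getD k 0 == c) = true ∧ ((ys.take k).count c : Int) < m := by
    intro c
    rw [PySem.List.slice_to _ hm, ← List.map_take, List.mem_map]
    constructor
    · rintro ⟨j, hj, hjk⟩
      have hjk' : j = k := by exact_mod_cast hjk
      rw [hjk'] at hj
      have := (pv_mem_take_filter_range ys.length m.toNat k _ hk).1 hj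
      rw [← pv_count_take ys k c (by omega)] at this
      exact ⟨this.1, by omega⟩
    · rintro ⟨hc, hcount⟩
      refine ⟨k, ?_, rfl⟩
      rw [pv_mem_take_filter_range ys.length m.toNat k _ hk, ← pv_count_take ys k c (by omega)]
      exact ⟨hc, by omega⟩
  constructor
  · rintro (habs | ⟨g, hg, hmem⟩)
    · simp [PySem.Set.empty] at habs
    · obtain ⟨c, hc, rfl⟩ := List.mem_map.1 hg
      obtain ⟨hck, hcount⟩ := (h2 c).1 hmem
      unfold pvPred
      have : ys.getD k 0 = c := by simpa using hck
      subst this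
      simpa using hcount
  · intro hp
    refine Or.inr ⟨_, List.mem_map_of_mem (a := ys.getD k 0) ?_, (h2 (ys.getD k 0)).2 ⟨by simp, ?_⟩⟩
    · rw [PySem.Set.mem_ofList]
      rw [List.getD_eq_getElem ys 0 hk]
      exact List.getElem_mem hk
    · unfold pvPred at hp
      simpa using hp

-- ===== VERDICT (by name: the statement is the Claim_ definition above) =====
theorem balance_classes_spec : Claim_equal_balance_classes := by
  unfold Claim_equal_balance_classes
  intro xs ys _ hpre
  obtain ⟨hys, -⟩ := hpre
  unfold Spec_balance_classes
  -- the common threshold: the least class frequency mv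
  have hLne : (PySem.Set.ofList ys).map (fun c => (ys.count c : Int)) ≠ [] := by
    obtain ⟨y, t, rfl⟩ := List.exists_cons_of_ne_nil hys
    have : y ∈ PySem.Set.ofList (y :: t) := (PySem.Set.mem_ofList _ y).2 (List.mem_cons_self ..)
    intro h
    rw [List.map_eq_nil_iff] at h
    simp [h] at this
  obtain ⟨mv, hmv⟩ : ∃ mv, PySem.List.min? ((PySem.Set.ofList ys).map (fun c => (ys.count c : Int))) (fun x => x) = some mv := by
    cases h : PySem.List.min? ((PySem.Set.ofList ys).map (fun c => (ys.count c : Int))) (fun x => x) with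
    | none => exact absurd ((PySem.List.min?_eq_none_iff _ _).1 h) hLne
    | some v => exact ⟨v, rfl⟩
  have hmvmem := PySem.List.min?_mem hmv
  have hmvmin := PySem.List.min?_isMin hmv
  have hmv1 : 1 ≤ mv := by
    obtain ⟨c, hc, rfl⟩ := List.mem_map.1 hmvmem
    have hcm : c ∈ ys := (PySem.Set.mem_ofList ys c).1 hc
    have := List.count_pos_iff.2 hcm
    omega
  -- A's max_allowable is mv
  have hitems := PySem.Dict.items_counter ys
  have hmcne : PySem.List.sorted (PySem.Dict.counter ys).items (fun kv => kv.2) true ≠ [] := by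
    rw [Ne, PySem.List.sorted_eq_nil_iff, hitems, List.map_eq_nil_iff]
    intro h
    obtain ⟨y, t, rfl⟩ := List.exists_cons_of_ne_nil hys
    have : y ∈ PySem.Set.ofList (y :: t) := (PySem.Set.mem_ofList _ y).2 (List.mem_cons_self ..)
    simp [h] at this
  have hAm : (PySem.List.pyGetD (PySem.List.sorted (PySem.Dict.counter ys).items (fun kv => kv.2) true) (-1) ((0 : Int), (0 : Int))).2 = mv := by
    rw [PySem.List.pyGetD_neg_one _ _ hmcne]
    have hperm := PySem.List.sorted_perm (PySem.Dict.counter ys).items (fun kv => kv.2) true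
    apply le_antisymm
    · obtain ⟨c, hc, hceq⟩ := List.mem_map.1 hmvmem
      have hq : (c, (ys.count c : Int)) ∈ PySem.List.sorted (PySem.Dict.counter ys).items (fun kv => kv.2) true :=
        hperm.mem_iff.2 (by rw [hitems]; exact List.mem_map_of_mem hc)
      have := pv_getLast_key_min _ hmcne (PySem.List.sorted_pairwise_rev _ _) _ hq
      simpa [hceq] using this
    · have hlmem := List.getLast_mem hmcne
      have hl2 : (PySem.List.sorted (PySem.Dict.counter ys).items (fun kv => kv.2) true).getLast hmcne ∈ (PySem.Set.ofList ys).map (fun k => (k, (ys.count k : Int))) := by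
        rw [← hitems]; exact hperm.mem_iff.1 hlmem
      obtain ⟨c, hc, hceq⟩ := List.mem_map.1 hl2
      have hcl : ((PySem.List.sorted (PySem.Dict.counter ys).items (fun kv => kv.2) true).getLast hmcne).2 ∈ (PySem.Set.ofList ys).map (fun c => (ys.count c : Int)) :=
        List.mem_map.2 ⟨c, hc, by rw [← hceq]⟩
      exact hmvmin _ hcl
  -- B's m is mv
  have hBm : (PySem.List.min? ((((PySem.List.enumerate ys).foldl (fun d p => d.modify p.2 [] (· ++ [p.1])) (PySem.Dict.empty : PySem.Dict Int (List Int))).values).map (fun g => PySem.List.len g)) (fun x => x)).getD 0 = mv := by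
    rw [pv_lens_eq, hmv]
    rfl
  -- evaluate A
  have hloop := pv_loopA xs ys mv ys [] ((PySem.Dict.counter ys).keys.foldl (fun d clss => d.insert clss 0) PySem.Dict.empty) [] []
    (by simp)
    (fun c => by
      rw [pv_init_dict_getD _ _ (fun c' => by simp [PySem.Dict.getD_empty]) c]
      simp
      omega)
  simp only [List.length_nil, Nat.cast_zero, List.nil_append, ← List.range_eq_range'] at hloop
  have hA : balance_classes xs ys =
      ((pvSel ys mv).map (fun (k : Nat) => PySem.List.pyGetD xs (k : Int) 0),
       (pvSel ys mv).map (fun k => ys.getD k 0)) := by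
    simp only [balance_classes]
    rw [hAm, hloop]
    rfl
  -- evaluate B
  have hB : balance_classes_alt xs ys =
      ((pvSel ys mv).map (fun (k : Nat) => PySem.List.pyGetD xs (k : Int) 0),
       (pvSel ys mv).map (fun k => ys.getD k 0)) := by
    simp only [balance_classes_alt]
    rw [hBm, PySem.List.len_eq, PySem.List.pyRange_zero_nat, List.filterMap_map, List.filterMap_map]
    have hx : ∀ k ∈ List.range ys.length,
        ((fun i => if PySem.Set.contains ((((PySem.List.enumerate ys).foldl (fun d p => d.modify p.2 [] (· ++ [p.1])) (PySem.Dict.empty : PySem.Dict Int (List Int))).values).foldl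
              (fun s g => PySem.Set.update s (PySem.List.slice g none (some mv))) PySem.Set.empty) i then some (PySem.List.pyGetD xs i 0) else none) ∘ (fun j : Nat => (j : Int))) k
        = (fun (k : Nat) => if pvPred ys mv k then some (PySem.List.pyGetD xs (k : Int) 0) else none) k := by
      intro k hk
      simp only [Function.comp_apply]
      rw [pv_selected_mem ys mv (by omega) k (List.mem_range.1 hk)]
    have hy : ∀ k ∈ List.range ys.length,
        ((fun i => if PySem.Set.contains ((((PySem.List.enumerate ys).foldl (fun d p => d.modify p.2 [] (· ++ [p.1])) (PySem.Dict.empty : PySem.Dict Int (List Int))).values).foldl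
              (fun s g => PySem.Set.update s (PySem.List.slice g none (some mv))) PySem.Set.empty) i then some (PySem.List.pyGetD ys i 0) else none) ∘ (fun j : Nat => (j : Int))) k
        = (fun k => if pvPred ys mv k then some (ys.getD k 0) else none) k := by
      intro k hk
      simp only [Function.comp_apply, PySem.List.pyGetD_natCast]
      rw [pv_selected_mem ys mv (by omega) k (List.mem_range.1 hk)]
    rw [List.filterMap_congr hx, List.filterMap_congr hy, pv_filterMap_if, pv_filterMap_if]
    rfl
  rw [hA, hB]
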